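-- pv_equiv track=rewrite | github.com/oczkers/MITx-6.00x | Week3/Lecture5/p9.py | semordnilap
-- ===== SOURCE A (Python) =====
-- def semordnilap(str1, str2):
--     '''
--     str1: a string
--     str2: a string
--
--     returns: True if str1 and str2 are semordnilap;
--              False otherwise.
--     '''
--     if len(str1) != len(str2):
--         return False
--     if len(str1) > 0:
--         if str1[0] == str2[-1]:
--             str1 = str1[1:]
--             str2 = str2[:-1]
--             return semordnilap(str1, str2)
--         else:
--             return False
--     else:
--         return True
-- ===== SOURCE B (Python) =====
-- def semordnilap(str1, str2):
--     '''
--     str1: a string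
--     str2: a string
--
--     returns: True if str1 and str2 are semordnilap;
--              False otherwise.
--     '''
--     if len(str1) != len(str2):
--         return False
--     n = len(str1)
--     for i in range(n):
--         if str1[i] != str2[n - 1 - i]:
--             return False
--     return True
-- ===== Notes on version B (the rewrite author's own statement) =====
-- stated objective: faster
-- what changed: Replaces the recursive slice-and-recurse (which builds two new slices per step, O(n^2) total) with a single index loop comparing str1[i] to str2[n-1-i], no slices allocated.
import Mathlib
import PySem

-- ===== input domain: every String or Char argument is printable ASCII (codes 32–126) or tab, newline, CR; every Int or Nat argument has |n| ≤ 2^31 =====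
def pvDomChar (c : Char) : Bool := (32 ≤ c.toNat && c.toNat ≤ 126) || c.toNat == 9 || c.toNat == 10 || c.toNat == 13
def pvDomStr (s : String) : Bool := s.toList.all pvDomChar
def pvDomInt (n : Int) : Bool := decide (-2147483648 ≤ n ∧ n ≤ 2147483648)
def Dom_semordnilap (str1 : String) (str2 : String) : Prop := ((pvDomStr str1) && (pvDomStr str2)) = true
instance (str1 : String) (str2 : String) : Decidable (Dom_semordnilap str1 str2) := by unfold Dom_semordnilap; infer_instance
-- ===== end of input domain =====

-- B replaces A's recursive slice-and-recurse with a single index loop over the two strings (faster: no slices allocated per step).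


-- ===== PORT A =====
-- recursion of A over the character lists: compare first of str1 with last of str2 (str2[-1]),
-- then recurse on str1[1:] (tail) and str2[:-1] (dropLast)
def pvSemRec : List Char → List Char → Bool
  | l1, l2 =>
    if l1.length ≠ l2.length then false
    else if _h : 0 < l1.length then
      if PySem.List.pyGet? l1 0 == PySem.List.pyGet? l2 (-1) then
        pvSemRec l1.tail l2.dropLast
      else false
    else true
termination_by l1 _ => l1.length
decreasing_by simp [List.length_tail]; omega

def semordnilap (str1 : String) (str2 : String) : Bool :=
  pvSemRec str1.toList str2.toList

-- ===== PORT B =====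
-- the index loop of Source B: for i in range(n): compare str1[i] with str2[n-1-i]
def pvChkIdx (l1 l2 : List Char) (n i : Nat) : Bool :=
  if i < n then
    if l1.getD i ' ' ≠ l2.getD (n - 1 - i) ' ' then false
    else pvChkIdx l1 l2 n (i + 1)
  else true
termination_by n - i

def semordnilap_alt (str1 : String) (str2 : String) : Bool :=
  let l1 := str1.toList
  let l2 := str2.toList
  if l1.length ≠ l2.length then false
  else pvChkIdx l1 l2 l1.length 0

-- ===== PRECONDITION & SPEC =====
def Spec_semordnilap (str1 : String) (str2 : String) (out : Bool) : Prop := out = semordnilap_alt str1 str2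
instance (str1 : String) (str2 : String) (out : Bool) : Decidable (Spec_semordnilap str1 str2 out) := by unfold Spec_semordnilap; infer_instance

-- ===== CLAIM (what is proved, stated in full; the proofs are below) =====
def Claim_equal_semordnilap : Prop := ∀ (str1 : String) (str2 : String), Dom_semordnilap str1 str2 → Spec_semordnilap str1 str2 (semordnilap str1 str2)

-- ===== LEMMAS AND PROOFS =====

-- A's recursion decides "l1 is the reverse of l2"
theorem pvSemRec_eq_beq_reverse (l1 l2 : List Char) : pvSemRec l1 l2 = (l1 == l2.reverse) := by
  fun_induction pvSemRec with
  | case1 l1 l2 hne =>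
    have : (l1 == l2.reverse) = false := by
      apply beq_false_of_ne
      intro h; exact hne (by simpa using congrArg List.length h)
    simp [this]
  | case2 l1 l2 hlen hpos hhd ih =>
    rw [not_ne_iff] at hlen
    obtain ⟨c, t1, rfl⟩ := List.exists_cons_of_ne_nil (List.ne_nil_of_length_pos hpos)
    have h2 : l2 ≠ [] := by intro h; subst h; simp at hlen
    obtain ⟨t2, d, rfl⟩ : ∃ t2 d, l2 = t2 ++ [d] :=
      ⟨l2.dropLast, l2.getLast h2, (List.dropLast_append_getLast h2).symm⟩
    simp only [PySem.List.pyGet?_zero_cons, PySem.List.pyGet?_neg_one_append_singleton,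
      Option.some_beq_some] at hhd
    have hcd : c = d := by simpa using hhd
    have ih' : pvSemRec t1 t2 = (t1 == t2.reverse) := by simpa using ih
    simp [hcd, List.reverse_append, ih']
  | case3 l1 l2 hlen hpos hhd =>
    rw [not_ne_iff] at hlen
    obtain ⟨c, t1, rfl⟩ := List.exists_cons_of_ne_nil (List.ne_nil_of_length_pos hpos)
    have h2 : l2 ≠ [] := by intro h; subst h; simp at hlen
    obtain ⟨t2, d, rfl⟩ : ∃ t2 d, l2 = t2 ++ [d] :=
      ⟨l2.dropLast, l2.getLast h2, (List.dropLast_append_getLast h2).symm⟩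
    simp only [PySem.List.pyGet?_zero_cons, PySem.List.pyGet?_neg_one_append_singleton,
      Option.some_beq_some] at hhd
    have hcd : c ≠ d := by simpa using hhd
    simp [List.reverse_append, hcd]
  | case4 l1 l2 hlen hpos =>
    rw [not_ne_iff] at hlen
    have h1 : l1 = [] := List.eq_nil_of_length_eq_zero (by omega)
    have h2 : l2 = [] := List.eq_nil_of_length_eq_zero (by omega)
    simp [h1, h2]

-- B's loop from index i decides "drop i l1 equals drop i (reverse l2)" (when n is the common length)
theorem pvChkIdx_eq_beq_drop (l1 l2 : List Char) (n i : Nat)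
    (h1 : l1.length = n) (h2 : l2.length = n) :
    pvChkIdx l1 l2 n i = (l1.drop i == l2.reverse.drop i) := by
  fun_induction pvChkIdx with
  | case1 i hi hne =>
    have hi1 : i < l1.length := by omega
    have hi2 : i < l2.reverse.length := by simp; omega
    have hd1 : l1.drop i = l1[i] :: l1.drop (i + 1) := List.drop_eq_getElem_cons hi1
    have hd2 : l2.reverse.drop i = l2.reverse[i] :: l2.reverse.drop (i + 1) :=
      List.drop_eq_getElem_cons hi2
    have hrev : l2.reverse[i] = l2[n - 1 - i] := by
      rw [List.getElem_reverse]; congr 1; omega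
    have hgd1 : l1.getD i ' ' = l1[i] := List.getD_eq_getElem l1 ' ' hi1
    have hgd2 : l2.getD (n - 1 - i) ' ' = l2[n - 1 - i] := List.getD_eq_getElem l2 ' ' (by omega)
    rw [hgd1, hgd2, ← hrev] at hne
    have hfalse : (l1[i] == l2.reverse[i]) = false := beq_false_of_ne hne
    rw [hd1, hd2, List.cons_beq_cons, hfalse]
    simp
  | case2 i hi heq ih =>
    have hi1 : i < l1.length := by omega
    have hi2 : i < l2.reverse.length := by simp; omega
    have hd1 : l1.drop i = l1[i] :: l1.drop (i + 1) := List.drop_eq_getElem_cons hi1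
    have hd2 : l2.reverse.drop i = l2.reverse[i] :: l2.reverse.drop (i + 1) :=
      List.drop_eq_getElem_cons hi2
    have hrev : l2.reverse[i] = l2[n - 1 - i] := by
      rw [List.getElem_reverse]; congr 1; omega
    have hgd1 : l1.getD i ' ' = l1[i] := List.getD_eq_getElem l1 ' ' hi1
    have hgd2 : l2.getD (n - 1 - i) ' ' = l2[n - 1 - i] := List.getD_eq_getElem l2 ' ' (by omega)
    rw [hgd1, hgd2, ← hrev] at heq
    rw [not_ne_iff] at heq
    rw [ih, hd1, hd2]
    simp [heq]
  | case3 i hi =>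
    have : l1.drop i = [] := List.drop_eq_nil_of_le (by omega)
    have : l2.reverse.drop i = [] := List.drop_eq_nil_of_le (by simp; omega)
    simp [*]

-- ===== VERDICT (by name: the statement is the Claim_ definition above) =====
theorem semordnilap_spec : Claim_equal_semordnilap := by
  intro str1 str2 _
  unfold Spec_semordnilap semordnilap semordnilap_alt
  rw [pvSemRec_eq_beq_reverse]
  show (str1.toList == str2.toList.reverse) =
    if str1.toList.length ≠ str2.toList.length then false
    else pvChkIdx str1.toList str2.toList str1.toList.length 0
  split_ifs with h
  · apply beq_false_of_ne
    intro he; exact h (by simpa using congrArg List.length he)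
  · rw [not_ne_iff] at h
    rw [pvChkIdx_eq_beq_drop _ _ _ 0 rfl h.symm]
    simp
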